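-- pv_equiv track=rewrite | github.com/mitsuo0114/competitive_programming | python/atcoder/Beginner082/C.py | solve
-- ===== SOURCE A (Python) =====
-- from collections import Counter
--
-- def solve(N, As):
--     c = Counter(As)
--     ans = 0
--     for k, v in c.items():
--         if k < v:
--             ans += v - k
--         elif k == v:
--             pass
--         else:
--             ans += v
--     return ans
-- ===== SOURCE B (Python) =====
-- def solve(N, As):
--     # sort a copy and scan runs of equal values (run-length grouping)
--     xs = sorted(As)
--     if not xs:
--         return 0
--     total = 0
--     cur = xs[0]
--     cnt = 1
--     for y in xs[1:]:
--         if y == cur: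
--             cnt += 1
--         else:
--             total += cnt - cur if cnt >= cur else cnt
--             cur, cnt = y, 1
--     total += cnt - cur if cnt >= cur else cnt
--     return total
-- ===== Notes on version B (the rewrite author's own statement) =====
-- stated objective: alternative
-- what changed: Replaces the Counter hash-count pass with sorting a copy and a single run-length scan over consecutive equal elements, accumulating each group's cost with a single two-way branch.
import Mathlib
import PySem

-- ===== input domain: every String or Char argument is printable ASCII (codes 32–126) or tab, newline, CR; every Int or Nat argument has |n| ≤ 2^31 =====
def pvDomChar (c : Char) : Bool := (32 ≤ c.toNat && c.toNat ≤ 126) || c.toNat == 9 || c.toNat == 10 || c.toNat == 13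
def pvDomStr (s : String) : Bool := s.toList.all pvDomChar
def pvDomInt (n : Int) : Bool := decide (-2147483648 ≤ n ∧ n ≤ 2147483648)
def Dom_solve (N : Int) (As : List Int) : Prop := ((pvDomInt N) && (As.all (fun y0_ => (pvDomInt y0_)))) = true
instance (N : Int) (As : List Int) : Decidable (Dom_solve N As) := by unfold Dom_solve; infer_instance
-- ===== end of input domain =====

-- B sorts a copy of As and accumulates each group's cost in one run-length scan instead of building a Counter; alternative decomposition, same result.


-- ===== PORT A =====
def solve (N : Int) (As : List Int) : Int :=
  let c := PySem.Dict.counter As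
  c.items.foldl (fun ans kv =>
    if kv.1 < kv.2 then ans + (kv.2 - kv.1)
    else if kv.1 = kv.2 then ans
    else ans + kv.2) 0

-- ===== PORT B =====
-- cost of one group of value k occurring v times: '(v - k) if v >= k else v'
def costB (k v : Int) : Int := if v ≥ k then v - k else v

-- loop body: state (total, cur, cnt)
def stepB (st : Int × Int × Int) (y : Int) : Int × Int × Int :=
  if y = st.2.1 then (st.1, st.2.1, st.2.2 + 1)
  else (st.1 + costB st.2.1 st.2.2, y, 1)

def solve_alt (N : Int) (As : List Int) : Int :=
  match PySem.List.sorted As (fun x => x) false with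
  | [] => 0
  | x :: rest =>
    let st := rest.foldl stepB (0, x, 1)
    st.1 + costB st.2.1 st.2.2

-- ===== PRECONDITION & SPEC =====
def Spec_solve (N : Int) (As : List Int) (out : Int) : Prop := out = solve_alt N As
instance (N : Int) (As : List Int) (out : Int) : Decidable (Spec_solve N As out) := by unfold Spec_solve; infer_instance

-- ===== CLAIM (what is proved, stated in full; the proofs are below) =====
def Claim_equal_solve : Prop := ∀ (N : Int) (As : List Int), Dom_solve N As → Spec_solve N As (solve N As)

-- ===== LEMMAS AND PROOFS =====\n
-- common value: sum over the distinct elements of ss of the group cost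
def G (ss : List Int) : Int :=
  ((PySem.List.dedup ss).map (fun k => costB k (ss.count k))).sum

lemma dedup_cons (y : Int) (ss : List Int) :
    PySem.List.dedup (y :: ss) = y :: (PySem.List.dedup ss).filter (fun z => z ≠ y) := by
  simp [PySem.Set.ofList_cons, PySem.Set.discard]
  apply List.filter_congr
  intro x _
  by_cases h : x = y
  · subst h; simp
  · simp [h]

lemma G_cons (y : Int) (ss : List Int) :
    G (y :: ss) = costB y (1 + ss.count y) + G (ss.filter (fun z => z ≠ y)) := by
  unfold G
  rw [dedup_cons]
  have hperm : ((PySem.List.dedup ss).filter (fun z => z ≠ y)).Perm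
      (PySem.List.dedup (ss.filter (fun z => z ≠ y))) := by
    apply (List.perm_ext_iff_of_nodup
      ((PySem.List.nodup_dedup ss).filter _) (PySem.List.nodup_dedup _)).mpr
    intro a
    simp
  have hmap : ((PySem.List.dedup ss).filter (fun z => z ≠ y)).map
        (fun k => costB k ((y :: ss).count k))
      = ((PySem.List.dedup ss).filter (fun z => z ≠ y)).map
        (fun k => costB k ((ss.filter (fun z => z ≠ y)).count k)) := by
    apply List.map_congr_left
    intro k hk
    have hky : k ≠ y := by
      have := List.of_mem_filter hk
      simpa using this
    have h1 : (y :: ss).count k = ss.count k := by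
      simp [Ne.symm hky]
    have h2 : (ss.filter (fun z => z ≠ y)).count k = ss.count k :=
      List.count_filter (by simpa using hky)
    rw [h1, h2]
  simp only [List.map_cons, List.sum_cons]
  rw [List.count_cons_self, hmap, (hperm.map (fun k => costB k ((ss.filter (fun z => z ≠ y)).count k))).sum_eq]
  push_cast
  ring_nf

lemma solve_eq_G (N : Int) (As : List Int) : solve N As = G As := by
  unfold solve G
  simp only [PySem.Dict.items_counter]
  have hc := PySem.List.foldl_congr_mem
    (l := (PySem.Set.ofList As).map (fun k => (k, (As.count k : Int))))
    (init := (0 : Int))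
    (f := fun ans kv =>
      if kv.1 < kv.2 then ans + (kv.2 - kv.1)
      else if kv.1 = kv.2 then ans else ans + kv.2)
    (g := fun ans kv => ans + costB kv.1 kv.2)
    (by intro acc kv _; unfold costB; dsimp only; split_ifs <;> omega)
  rw [hc, PySem.List.foldl_add]
  simp [List.map_map, Function.comp_def, PySem.List.dedup_eq_ofList]

lemma scan_eq (ys : List Int) : ∀ (t cur cnt : Int),
    ys.Pairwise (· ≤ ·) → (∀ y ∈ ys, cur ≤ y) →
    (ys.foldl stepB (t, cur, cnt)).1
      + costB (ys.foldl stepB (t, cur, cnt)).2.1 (ys.foldl stepB (t, cur, cnt)).2.2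
      = t + costB cur (cnt + ys.count cur) + G (ys.filter (fun z => z ≠ cur)) := by
  induction ys with
  | nil => intro t cur cnt _ _; simp [G]
  | cons y ys ih =>
    intro t cur cnt hpw hle
    have hpw' : ys.Pairwise (· ≤ ·) := hpw.of_cons
    have hyle : ∀ z ∈ ys, y ≤ z := by
      intro z hz; exact List.rel_of_pairwise_cons hpw hz
    by_cases hyc : y = cur
    · subst hyc
      simp only [List.foldl_cons, stepB]
      rw [if_pos trivial]
      rw [ih t y (cnt + 1) hpw' hyle]
      have hf : (y :: ys).filter (fun z => z ≠ y) = ys.filter (fun z => z ≠ y) := by simp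
      rw [hf, List.count_cons_self]
      have harg : cnt + 1 + (ys.count y : Int) = cnt + ((ys.count y : Int) + 1) := by ring
      push_cast
      rw [harg]
    · have hnc : ∀ z ∈ y :: ys, z ≠ cur := by
        intro z hz
        have hcy : cur < y := lt_of_le_of_ne (hle y (by simp)) (fun h => hyc h.symm)
        rcases List.mem_cons.mp hz with h | h
        · subst h; exact hyc
        · have := hyle z h; omega
      simp only [List.foldl_cons, stepB]
      rw [if_neg hyc]
      rw [ih (t + costB cur cnt) y 1 hpw' hyle]
      have hcount : (y :: ys).count cur = 0 :=
        List.count_eq_zero.mpr (fun h => hnc cur h rfl)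
      have hfilter : (y :: ys).filter (fun z => z ≠ cur) = y :: ys := by
        apply List.filter_eq_self.mpr
        intro z hz; simpa using hnc z hz
      rw [hcount, hfilter, G_cons]
      push_cast
      ring_nf

lemma G_perm {s1 s2 : List Int} (h : s1.Perm s2) : G s1 = G s2 := by
  unfold G
  have hperm : (PySem.List.dedup s1).Perm (PySem.List.dedup s2) := by
    apply (List.perm_ext_iff_of_nodup (PySem.List.nodup_dedup s1)
      (PySem.List.nodup_dedup s2)).mpr
    intro a
    simp [h.mem_iff]
  have hmap : (PySem.List.dedup s1).map (fun k => costB k (s1.count k))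
      = (PySem.List.dedup s1).map (fun k => costB k (s2.count k)) := by
    apply List.map_congr_left
    intro k _
    rw [h.count_eq]
  rw [hmap, (hperm.map (fun k => costB k (s2.count k))).sum_eq]

lemma solve_alt_eq_G (N : Int) (As : List Int) : solve_alt N As = G As := by
  unfold solve_alt
  cases h : PySem.List.sorted As (fun x => x) false with
  | nil =>
    have : As = [] := (PySem.List.sorted_eq_nil_iff _ _ _).mp h
    simp [this, G]
  | cons x rest =>
    have hpw : (x :: rest).Pairwise (· ≤ ·) := by
      have := PySem.List.sorted_pairwise As (fun x => x) (κ := Int)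
      rw [h] at this
      exact this
    have hAperm : (x :: rest).Perm As := by
      have := PySem.List.sorted_perm As (fun x => x) false
      rw [h] at this
      exact this
    show (rest.foldl stepB (0, x, 1)).1
      + costB (rest.foldl stepB (0, x, 1)).2.1 (rest.foldl stepB (0, x, 1)).2.2 = G As
    rw [scan_eq rest 0 x 1 hpw.of_cons
      (fun z hz => List.rel_of_pairwise_cons hpw hz)]
    rw [← G_perm hAperm, G_cons]
    simp

-- ===== VERDICT (by name: the statement is the Claim_ definition above) =====
theorem solve_spec : Claim_equal_solve := by
  intro N As _
  unfold Spec_solve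
  rw [solve_eq_G, solve_alt_eq_G]
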